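-- pv_equiv track=rewrite | github.com/christofmuc/KnobKraft-orm | adaptations/korg/GenericKorg.py | escapeSysex
-- ===== SOURCE A (Python) =====
-- from typing import Iterable, List, Sequence
--
-- def escapeSysex(data: Iterable[int]) -> List[int]:
--     result = []
--     data = list(data)
--     data_index = 0
--     while data_index < len(data):
--         ms_bits = 0
--         for i in range(7):
--             if data_index + i < len(data):
--                 ms_bits |= (data[data_index + i] & 0x80) >> (7 - i)
--         result.append(ms_bits)
--         for i in range(7):
--             if data_index + i < len(data):
--                 result.append(data[data_index + i] & 0x7f)
--         data_index += 7
--     return result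
-- ===== SOURCE B (Python) =====
-- def escapeSysex(data):
--     data = list(data)
--     n = len(data)
--     out_len = n + (n + 6) // 7
--     def ms(c):
--         lo = 7 * c
--         return sum(((data[k] & 0x80) >> 7) << (k - lo) for k in range(lo, min(lo + 7, n)))
--     return [ms(j // 8) if j % 8 == 0 else data[j - j // 8 - 1] & 0x7f
--             for j in range(out_len)]
-- ===== Notes on version B (the rewrite author's own statement) =====
-- stated objective: alternative
-- what changed: Replaces A's chunk-scanning loop (index-tracked while loop appending an MSB byte then the masked bytes of each 7-byte group) by a direct output-indexed construction: the output length n + ceil(n/7) is computed up front and each output position j is filled by a closed-form index map (position j%8==0 gets the MSB byte of group j//8, computed as a sum of shifted sign bits; otherwise data[j - j//8 - 1] & 0x7f).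
import Mathlib
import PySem

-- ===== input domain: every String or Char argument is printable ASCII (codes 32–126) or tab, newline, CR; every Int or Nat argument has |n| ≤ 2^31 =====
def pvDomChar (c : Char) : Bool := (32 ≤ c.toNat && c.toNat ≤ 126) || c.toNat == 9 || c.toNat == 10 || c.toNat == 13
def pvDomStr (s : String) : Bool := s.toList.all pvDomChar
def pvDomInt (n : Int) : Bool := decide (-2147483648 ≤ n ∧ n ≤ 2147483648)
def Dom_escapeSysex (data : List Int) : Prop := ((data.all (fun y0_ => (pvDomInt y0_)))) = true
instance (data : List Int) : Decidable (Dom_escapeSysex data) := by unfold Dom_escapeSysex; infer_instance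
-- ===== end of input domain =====

-- B replaces A's index-tracked chunk-scanning loop by a direct output-indexed
-- construction (output length computed up front, each position filled by a
-- closed-form index map); objective: alternative.

-- ===== PORT A =====
-- while data_index < len(data): compute ms_bits over range(7) with bounds guard,
-- append it, append the 7 low-bit bytes with the same guard, advance by 7.
def escapeSysexLoop (data : List Int) (dataIndex : Int) (result : List Int) : List Int :=
  if _h : dataIndex < (data.length : Int) then
    let ms :=
      (PySem.List.pyRange 0 7 1).foldl
        (fun acc i =>
          if dataIndex + i < (data.length : Int) then
            PySem.Int.bor acc
              ((PySem.Int.band ((PySem.List.pyGet? data (dataIndex + i)).getD 0) 128) >>> (7 - i).toNat)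
          else acc) 0
    let result1 := result ++ [ms]
    let result2 :=
      (PySem.List.pyRange 0 7 1).foldl
        (fun acc i =>
          if dataIndex + i < (data.length : Int) then
            acc ++ [PySem.Int.band ((PySem.List.pyGet? data (dataIndex + i)).getD 0) 127]
          else acc) result1
    escapeSysexLoop data (dataIndex + 7) result2
  else result
termination_by ((data.length : Int) - dataIndex).toNat
decreasing_by omega

def escapeSysex (data : List Int) : List Int :=
  escapeSysexLoop data 0 []

-- ===== PORT B =====
-- def ms(c): lo = 7*c; return sum(((data[k] & 0x80) >> 7) << (k - lo) for k in range(lo, min(lo+7, n)))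
-- (indices k are always in range in Python, so data[k] is ported as pyGet? ... |>.getD 0)
def escapeSysexAltMs (data : List Int) (c : Int) : Int :=
  let lo := 7 * c
  ((PySem.List.pyRange lo (min (lo + 7) (data.length : Int)) 1).map
    (fun k => ((PySem.Int.band ((PySem.List.pyGet? data k).getD 0) 128) >>> 7) <<< (k - lo).toNat)).sum

-- [ms(j // 8) if j % 8 == 0 else data[j - j // 8 - 1] & 0x7f for j in range(out_len)]
def escapeSysex_alt (data : List Int) : List Int :=
  let n : Int := data.length
  let outLen := n + PySem.Int.floordiv (n + 6) 7
  (PySem.List.pyRange 0 outLen 1).map (fun j =>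
    if PySem.Int.mod j 8 = 0 then escapeSysexAltMs data (PySem.Int.floordiv j 8)
    else PySem.Int.band ((PySem.List.pyGet? data (j - PySem.Int.floordiv j 8 - 1)).getD 0) 127)

-- ===== PRECONDITION & SPEC =====
def Spec_escapeSysex (data : List Int) (out : List Int) : Prop := out = escapeSysex_alt data
instance (data : List Int) (out : List Int) : Decidable (Spec_escapeSysex data out) := by unfold Spec_escapeSysex; infer_instance

-- ===== CLAIM (what is proved, stated in full; the proofs are below) =====
def Claim_equal_escapeSysex : Prop := ∀ (data : List Int), Dom_escapeSysex data → Spec_escapeSysex data (escapeSysex data)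

-- ===== LEMMAS AND PROOFS =====

-- the canonical chunkwise description both programs are reduced to
def msB : List Int → Nat → Int
  | [], _ => 0
  | b :: t, i => ((PySem.Int.band b 128) >>> 7) <<< i + msB t (i + 1)

def canon (data : List Int) : List Int :=
  if h : data = [] then []
  else msB (data.take 7) 0 ::
    ((data.take 7).map (fun b => PySem.Int.band b 127) ++ canon (data.drop 7))
termination_by data.length
decreasing_by
  have : data.length ≠ 0 := fun hn => h (List.eq_nil_of_length_eq_zero hn)
  simp; omega

lemma band128_cases (b : Int) : PySem.Int.band b 128 = 0 ∨ PySem.Int.band b 128 = 128 := by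
  by_cases hb : 0 ≤ b
  · simp only [PySem.Int.band, if_pos hb, if_pos (by norm_num : (0:Int) ≤ 128)]
    rw [show ((128:Int).toNat) = 2^7 by decide, Nat.and_two_pow b.toNat 7]
    cases b.toNat.testBit 7 <;> simp
  · simp only [PySem.Int.band, if_neg hb, if_pos (by norm_num : (0:Int) ≤ 128)]
    rw [show ((128:Int).toNat) = 2^7 by decide, Nat.two_pow_and ((-b - 1).toNat) 7]
    cases ((-b - 1).toNat).testBit 7 <;> simp

lemma lor_pow_eq_add (i : Nat) : ∀ a : Nat, a < 2^i → a ||| 2^i = a + 2^i := by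
  induction i with
  | zero => intro a h; interval_cases a; decide
  | succ i ih =>
      intro a h
      have hd : a = Nat.bit (a % 2 = 1) (a / 2) := by
        simp [Nat.bit]; rcases Nat.decEq (a % 2) 1 with hb | hb <;> simp [hb] <;> omega
      have hp : (2:Nat)^(i+1) = Nat.bit false (2^i) := by simp [Nat.bit]; ring
      rw [hd, hp, Nat.lor_bit]
      have hih := ih (a/2) (by omega)
      simp [Nat.bit, hih]
      rcases Nat.decEq (a % 2) 1 with hb | hb <;> simp [hb] <;> omega

lemma shift128 (i : Nat) (h : i ≤ 7) : (128:Int) >>> (7 - (i:Int)).toNat = 2^i := by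
  have hk : (7 - (i:Int)).toNat = 7 - i := by omega
  have hpow : ((2:Nat)^(7-i) * 2^i : Nat) = 128 := by
    rw [← pow_add, show 7 - i + i = 7 by omega]; norm_num
  rw [hk, Int.shiftRight_eq_div_pow,
    show (128:Int) = ((2^(7-i) : Nat) : Int) * 2^i by push_cast; exact_mod_cast congrArg (Nat.cast (R := Int)) hpow.symm,
    Int.mul_ediv_cancel_left _ (by positivity)]

lemma msA_eq : ∀ (c : List Int) (i : Nat) (acc : Int), i + c.length ≤ 7 → 0 ≤ acc → acc < 2^i →
    (PySem.List.enumerate c ((i:Nat):Int)).foldl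
      (fun m p => PySem.Int.bor m ((PySem.Int.band p.2 128) >>> (7 - p.1).toNat)) acc
    = acc + msB c i := by
  intro c
  induction c with
  | nil => intro i acc _ _ _; simp [PySem.List.enumerate, msB]
  | cons b t ih =>
      intro i acc hlen hnn hlt
      simp only [PySem.List.enumerate_cons, List.foldl_cons]
      have hcast : ((i:Int) + 1) = ((i+1 : Nat) : Int) := by push_cast; ring
      rcases band128_cases b with h | h
      · have hterm : (PySem.Int.band b 128) >>> (((7 - (i:Int)).toNat : Nat) : Int) = 0 := by
          rw [Int.shiftRight_natCast_right, h]; simp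
        rw [hterm, PySem.Int.bor_zero, hcast, ih (i+1) acc (by simp at hlen ⊢; omega) hnn (lt_of_lt_of_le hlt (pow_le_pow_right₀ (by norm_num) (by omega)))]
        simp [msB, h]
      · have hterm : (PySem.Int.band b 128) >>> (((7 - (i:Int)).toNat : Nat) : Int) = 2^i := by
          rw [Int.shiftRight_natCast_right, h]; exact shift128 i (by simp at hlen; omega)
        have hbor : PySem.Int.bor acc (2^i) = acc + 2^i := by
          rw [PySem.Int.bor_of_nonneg hnn (by positivity)]
          have h1 : ((2:Int)^i).toNat = 2^i := by
            have h2 : ((2:Int)^i) = ((2^i : Nat) : Int) := by push_cast; ring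
            rw [h2, Int.toNat_natCast]
          have h2 : acc.toNat < 2^i := by omega
          rw [h1, lor_pow_eq_add i acc.toNat h2]
          push_cast; omega
        rw [hterm, hbor, hcast, ih (i+1) (acc + 2^i) (by simp at hlen ⊢; omega) (by positivity) (by
          rw [pow_succ]; omega)]
        have hhead : ((PySem.Int.band b 128) >>> 7) <<< i = 2^i := by
          rw [h, show (128:Int) >>> 7 = 1 by decide, Int.shiftLeft_eq, one_mul]
        simp [msB, hhead]; ring

lemma enumerate_append_one {α : Type} (xs : List α) (x : α) :
    ∀ s : Int, PySem.List.enumerate (xs ++ [x]) s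
      = PySem.List.enumerate xs s ++ [(s + xs.length, x)] := by
  induction xs with
  | nil => intro s; simp [PySem.List.enumerate]
  | cons y ys ih =>
      intro s
      simp [PySem.List.enumerate, ih (s + 1)]
      ring_nf

lemma guard_fold_eq {α : Type} (data : List Int) (d : Int) (hd : 0 ≤ d)
    (g : α → Int → Int → α) :
    ∀ (n : Nat) (a : α),
      (PySem.List.pyRange 0 (n : Int) 1).foldl
        (fun acc i =>
          if d + i < (data.length : Int) then g acc i ((PySem.List.pyGet? data (d + i)).getD 0)
          else acc) a
      = (PySem.List.enumerate ((data.drop d.toNat).take n) 0).foldl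
          (fun acc p => g acc p.1 p.2) a := by
  intro n
  induction n with
  | zero => intro a; simp
  | succ n ih =>
      intro a
      have hsplit : PySem.List.pyRange 0 ((n + 1 : Nat) : Int) 1
          = PySem.List.pyRange 0 (n : Int) 1 ++ [(n : Int)] := by
        have := PySem.List.pyRange_one_succ_right (a := 0) (b := (n : Int)) (by omega)
        simpa [Nat.cast_add] using this
      rw [hsplit, List.foldl_append, ih]
      by_cases h : d + (n : Int) < (data.length : Int)
      · have hn : n < (data.drop d.toNat).length := by
          simp [List.length_drop]; omega
        have htake : (data.drop d.toNat).take (n + 1)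
            = (data.drop d.toNat).take n ++ [(data.drop d.toNat)[n]] := by
          rw [List.take_add_one]
          simp [List.getElem?_eq_getElem hn]
        have hget : (PySem.List.pyGet? data (d + (n : Int))).getD 0 = (data.drop d.toNat)[n] := by
          have hcast : d + (n : Int) = ((d.toNat + n : Nat) : Int) := by omega
          rw [hcast, PySem.List.pyGet?_natCast]
          have hlt : d.toNat + n < data.length := by omega
          simp [List.getElem?_eq_getElem hlt, List.getElem_drop]
        rw [htake, enumerate_append_one, List.foldl_append]
        simp only [List.foldl_cons, List.foldl_nil]
        rw [if_pos h, hget]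
        congr 1
        simp [List.length_drop] at hn ⊢
        omega
      · have hlen : (data.drop d.toNat).length ≤ n := by
          simp [List.length_drop]; omega
        have htake : (data.drop d.toNat).take (n + 1) = (data.drop d.toNat).take n := by
          rw [List.take_of_length_le hlen, List.take_of_length_le (by omega)]
        simp [h, htake]

lemma hmap (l : List Int) : ∀ (s : Int) (init : List Int),
    (PySem.List.enumerate l s).foldl
      (fun acc (p : Int × Int) => acc ++ [PySem.Int.band p.2 127]) init
    = init ++ l.map (fun b => PySem.Int.band b 127) := by
  induction l with
  | nil => intro s init; simp [PySem.List.enumerate]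
  | cons x xs ih => intro s init; simp [PySem.List.enumerate, ih (s + 1)]

-- A's loop from index d produces the canonical chunkwise output of the suffix
lemma loopA (fuel : Nat) :
    ∀ (data : List Int) (d : Int) (result : List Int), 0 ≤ d →
      data.length ≤ d.toNat + fuel →
      escapeSysexLoop data d result = result ++ canon (data.drop d.toNat) := by
  induction fuel with
  | zero =>
      intro data d result hd hle
      rw [escapeSysexLoop]
      have hdrop : data.drop d.toNat = [] := List.drop_eq_nil_of_le (by omega)
      rw [hdrop, canon]
      simp [show ¬ d < (data.length : Int) by omega]
  | succ fuel ih =>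
      intro data d result hd hle
      by_cases h : d < (data.length : Int)
      · rw [escapeSysexLoop]
        simp only [h, dif_pos]
        have hms := guard_fold_eq data d hd
          (fun acc i v => PySem.Int.bor acc ((PySem.Int.band v 128) >>> (7 - i).toNat)) 7 0
        have hbytes := guard_fold_eq data d hd
          (fun acc _i v => acc ++ [PySem.Int.band v 127]) 7
        beta_reduce at hms hbytes
        rw [show (((7:Nat)) : Int) = (7:Int) from rfl] at hms hbytes
        rw [hms, hbytes _]
        have hmsv := msA_eq ((data.drop d.toNat).take 7) 0 0 (by simp) le_rfl (by norm_num)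
        simp only [Nat.cast_zero, Int.shiftRight_natCast_right] at hmsv
        rw [hmsv, hmap]
        rw [ih data (d + 7) _ (by omega) (by omega)]
        have hne : data.drop d.toNat ≠ [] := by
          intro hnil
          have := congrArg List.length hnil
          simp at this; omega
        conv_rhs => rw [canon]
        rw [dif_neg hne]
        have hdd : data.drop (d + 7).toNat = (data.drop d.toNat).drop 7 := by
          rw [List.drop_drop]
          congr 1
          omega
        rw [hdd]
        simp [List.append_assoc]
      · rw [escapeSysexLoop]
        have hdrop : data.drop d.toNat = [] := List.drop_eq_nil_of_le (by omega)
        rw [hdrop, canon]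
        simp [h]

-- generalized sum of the B-side MSB comprehension
lemma sum_ms (data : List Int) : ∀ (cnt : Nat) (lo : Nat) (base : Nat) (hi : Int),
    (hi - lo).toNat = cnt →
    ((PySem.List.pyRange (lo:Int) hi 1).map
      (fun k => ((PySem.Int.band ((PySem.List.pyGet? data k).getD 0) 128) >>> 7)
                  <<< ((k - (lo:Int)).toNat + base))).sum
    = msB ((data.drop lo).take cnt) base := by
  intro cnt
  induction cnt with
  | zero =>
      intro lo base hi hcnt
      rw [PySem.List.pyRange_one_eq_nil (by omega)]
      simp [msB]
  | succ cnt ih =>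
      intro lo base hi hcnt
      rw [PySem.List.pyRange_one_cons (by omega), List.map_cons, List.sum_cons]
      have hrest : (PySem.List.pyRange ((lo:Int) + 1) hi 1).map
            (fun k => ((PySem.Int.band ((PySem.List.pyGet? data k).getD 0) 128) >>> 7)
                  <<< ((k - (lo:Int)).toNat + base))
          = (PySem.List.pyRange ((lo + 1 : Nat) : Int) hi 1).map
            (fun k => ((PySem.Int.band ((PySem.List.pyGet? data k).getD 0) 128) >>> 7)
                  <<< ((k - ((lo + 1 : Nat) : Int)).toNat + (base + 1))) := by
        rw [show ((lo + 1 : Nat) : Int) = (lo:Int) + 1 by push_cast; ring]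
        apply List.map_congr_left
        intro k hk
        rw [PySem.List.mem_pyRange_one] at hk
        congr 1
        omega
      rw [hrest, ih (lo + 1) (base + 1) hi (by omega)]
      have hget : (PySem.List.pyGet? data ((lo:Nat):Int)).getD 0 = data.getD lo 0 := by
        rw [PySem.List.pyGet?_natCast]; rfl
      rw [hget, show ((lo:Int) - (lo:Int)).toNat + base = base by omega]
      by_cases hlo : lo < data.length
      · rw [List.drop_eq_getElem_cons hlo, List.take_succ_cons]
        rw [List.getD_eq_getElem _ _ hlo]
        simp [msB]
      · have h1 : data.drop lo = [] := List.drop_eq_nil_of_le (by omega)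
        have h2 : data.drop (lo + 1) = [] := List.drop_eq_nil_of_le (by omega)
        have h3 : data.getD lo 0 = 0 := by
          simp [List.getD, List.getElem?_eq_none (by omega : data.length ≤ lo)]
        rw [h1, h2, h3]
        simp [msB, show PySem.Int.band 0 128 = 0 from by decide]

-- the B-side MSB helper as a canonical chunk value
lemma altMs_eq (data : List Int) (c : Int) (hc : 0 ≤ c) :
    escapeSysexAltMs data c
      = msB ((data.drop (7*c).toNat).take
          ((min (7*c+7) (data.length:Int)) - 7*c).toNat) 0 := by
  simp only [escapeSysexAltMs]
  have hcast : (7*c : Int) = (((7*c).toNat : Nat) : Int) := by omega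
  rw [hcast]
  have hsum := sum_ms data
      ((min ((((7*c).toNat : Nat) : Int) + 7) (data.length:Int)) - (((7*c).toNat : Nat) : Int)).toNat
      ((7*c).toNat) 0
      (min ((((7*c).toNat : Nat) : Int) + 7) (data.length:Int)) rfl
  simp only [Nat.add_zero] at hsum
  exact hsum

-- the non-MSB output positions 1..t of the first block are the masked data bytes
lemma low_block (data : List Int) (g : Int → Int) : ∀ (t : Nat), t ≤ data.length → t ≤ 7 →
    (PySem.List.pyRange 1 (1 + (t:Int)) 1).map
      (fun j => if PySem.Int.mod j 8 = 0 then g j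
        else PySem.Int.band ((PySem.List.pyGet? data (j - PySem.Int.floordiv j 8 - 1)).getD 0) 127)
    = (data.take t).map (fun b => PySem.Int.band b 127) := by
  intro t
  induction t with
  | zero => intro _ _; rw [show (1 + ((0:Nat):Int)) = 1 by norm_num, PySem.List.pyRange_one_eq_nil le_rfl]; simp
  | succ t ih =>
      intro hlen h7
      rw [show (1 + ((t+1:Nat):Int)) = (1 + (t:Nat)) + 1 by push_cast; ring,
        PySem.List.pyRange_one_succ_right (by omega), List.map_append, ih (by omega) (by omega)]
      have hj : (1 + (t:Nat) : Int) = ((1 + t : Nat) : Int) := by push_cast; ring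
      rw [List.map_cons, List.map_nil, hj]
      have hmod : PySem.Int.mod ((1 + t : Nat) : Int) 8 ≠ 0 := by
        rw [show (8:Int) = ((8:Nat):Int) by simp, PySem.Int.mod_natCast]
        have : (1 + t) % 8 = 1 + t := Nat.mod_eq_of_lt (by omega)
        omega
      rw [if_neg hmod, show (8:Int) = ((8:Nat):Int) by simp, PySem.Int.floordiv_natCast]
      have hdiv : (1 + t) / 8 = 0 := Nat.div_eq_of_lt (by omega)
      rw [hdiv]
      have hidx : ((1 + t : Nat) : Int) - ((0:Nat):Int) - 1 = ((t:Nat):Int) := by push_cast; ring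
      rw [hidx, PySem.List.pyGet?_natCast, List.getElem?_eq_getElem (by omega : t < data.length)]
      have hmt : t < (data.map (fun b => PySem.Int.band b 127)).length := by simp; omega
      rw [List.map_take, List.map_take, List.take_add_one,
        List.getElem?_eq_getElem hmt]
      simp [List.getElem_map]

-- B computes the canonical chunkwise output
lemma altB (fuel : Nat) : ∀ (data : List Int), data.length ≤ fuel →
    escapeSysex_alt data = canon data := by
  induction fuel with
  | zero =>
      intro data hlen
      have : data = [] := List.eq_nil_of_length_eq_zero (by omega)
      subst this
      rw [canon]; decide
  | succ fuel ih =>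
      intro data hlen
      by_cases hnil : data = []
      · subst hnil; rw [canon]; decide
      · have hm : 1 ≤ data.length := by
          cases data with
          | nil => exact absurd rfl hnil
          | cons a l => simp
        simp only [escapeSysex_alt]
        have hfd : PySem.Int.floordiv ((data.length:Int) + 6) 7
            = (((data.length + 6) / 7 : Nat) : Int) := by
          rw [show ((data.length:Int) + 6) = ((data.length + 6 : Nat):Int) by push_cast; ring,
            show (7:Int) = ((7:Nat):Int) by simp, PySem.Int.floordiv_natCast]
        have hK : (data.length:Int) + PySem.Int.floordiv ((data.length:Int) + 6) 7
            = ((data.length + (data.length + 6) / 7 : Nat) : Int) := by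
          rw [hfd]; push_cast; ring
        rw [hK]
        rw [canon, dif_neg hnil]
        by_cases hm7 : data.length ≤ 7
        · rw [show ((data.length + (data.length + 6) / 7 : Nat) : Int)
              = ((data.length + 1 : Nat) : Int) by congr 1; omega]
          rw [PySem.List.pyRange_one_cons (by push_cast; omega), List.map_cons]
          rw [if_pos (show PySem.Int.mod 0 8 = 0 from by decide),
            show PySem.Int.floordiv 0 8 = 0 from by decide,
            altMs_eq data 0 le_rfl]
          rw [show ((7:Int)*0).toNat = 0 from by decide,
            show (7:Int)*0 + 7 = 7 from by decide]
          rw [show (min (7:Int) (data.length:Int) - 7*0).toNat = data.length by omega]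
          rw [List.drop_zero, List.take_length,
            show data.take 7 = data from List.take_of_length_le hm7]
          rw [show ((data.length + 1 : Nat) : Int) = 1 + ((data.length : Nat) : Int) by push_cast; ring]
          rw [show (0:Int) + 1 = 1 by norm_num, low_block data _ data.length le_rfl hm7]
          rw [List.take_length,
            show data.drop 7 = ([]:List Int) from List.drop_eq_nil_of_le (by omega)]
          rw [canon]
          simp
        · have h7m : 7 < data.length := by omega
          rw [PySem.List.pyRange_one_append 0 8 ((data.length + (data.length + 6) / 7 : Nat) : Int)
            (by norm_num) (by push_cast; omega), List.map_append]
          rw [PySem.List.pyRange_one_cons (by norm_num : (0:Int) < 8), List.map_cons]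
          rw [if_pos (show PySem.Int.mod 0 8 = 0 from by decide),
            show PySem.Int.floordiv 0 8 = 0 from by decide,
            altMs_eq data 0 le_rfl,
            show ((7:Int)*0).toNat = 0 from by decide,
            show (7:Int)*0 + 7 = 7 from by decide,
            show (min (7:Int) (data.length:Int) - 7*0).toNat = 7 by omega,
            List.drop_zero]
          rw [show (0:Int) + 1 = 1 by norm_num,
            show PySem.List.pyRange 1 8 1 = PySem.List.pyRange 1 (1 + ((7:Nat):Int)) 1 by norm_num,
            low_block data _ 7 (by omega) le_rfl]
          have hrec : (PySem.List.pyRange 8 ((data.length + (data.length + 6) / 7 : Nat) : Int) 1).map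
              (fun j => if PySem.Int.mod j 8 = 0 then escapeSysexAltMs data (PySem.Int.floordiv j 8)
                else PySem.Int.band ((PySem.List.pyGet? data (j - PySem.Int.floordiv j 8 - 1)).getD 0) 127)
              = escapeSysex_alt (data.drop 7) := by
            simp only [escapeSysex_alt, List.length_drop]
            have hfd' : PySem.Int.floordiv (((data.length - 7 : Nat):Int) + 6) 7
                = (((data.length - 7 + 6) / 7 : Nat) : Int) := by
              rw [show (((data.length - 7:Nat):Int) + 6) = ((data.length - 7 + 6 : Nat):Int) by omega,
                show (7:Int) = ((7:Nat):Int) by simp, PySem.Int.floordiv_natCast]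
            rw [hfd',
              show ((data.length - 7:Nat):Int) + (((data.length - 7 + 6) / 7 : Nat) : Int)
                = ((data.length - 7 + (data.length - 7 + 6) / 7 : Nat) : Int) by omega]
            rw [PySem.List.pyRange_one, PySem.List.pyRange_one]
            rw [show (((data.length + (data.length + 6) / 7 : Nat) : Int) - 8).toNat
                = data.length - 7 + (data.length - 7 + 6) / 7 by omega,
              show (((data.length - 7 + (data.length - 7 + 6) / 7 : Nat) : Int) - 0).toNat
                = data.length - 7 + (data.length - 7 + 6) / 7 by omega]
            rw [List.map_map, List.map_map]
            apply List.map_congr_left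
            intro k hk
            rw [List.mem_range] at hk
            simp only [Function.comp_apply]
            rw [show (8:Int) + (k:Int) = ((8 + k : Nat):Int) by omega,
              show (0:Int) + (k:Int) = ((k : Nat):Int) by omega,
              show (8:Int) = ((8:Nat):Int) by simp]
            rw [PySem.Int.mod_natCast, PySem.Int.mod_natCast,
              PySem.Int.floordiv_natCast, PySem.Int.floordiv_natCast]
            rw [show (8 + k) % 8 = k % 8 by omega, show (8 + k) / 8 = k / 8 + 1 by omega]
            by_cases hk8 : ((k % 8 : Nat) : Int) = 0
            · rw [if_pos hk8, if_pos hk8]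
              rw [altMs_eq data _ (Int.natCast_nonneg _),
                altMs_eq (data.drop 7) _ (Int.natCast_nonneg _)]
              simp only [List.length_drop, List.drop_drop]
              congr 2
              · omega
              · congr 1
                omega
            · have hk0 : k % 8 ≠ 0 := by
                intro h; exact hk8 (by rw [h]; simp)
              rw [if_neg hk8, if_neg hk8]
              rw [show ((8 + k : Nat):Int) - ((k/8 + 1 : Nat):Int) - 1
                  = ((k - k/8 - 1 + 7 : Nat) : Int) by omega,
                show ((k : Nat):Int) - ((k/8 : Nat):Int) - 1
                  = ((k - k/8 - 1 : Nat) : Int) by omega]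
              rw [PySem.List.pyGet?_natCast, PySem.List.pyGet?_natCast, List.getElem?_drop,
                show 7 + (k - k/8 - 1) = k - k/8 - 1 + 7 by omega]
          rw [hrec, ih (data.drop 7) (by simp; omega)]
          simp

-- ===== VERDICT (by name: the statement is the Claim_ definition above) =====
theorem escapeSysex_spec : Claim_equal_escapeSysex := by
  intro data _
  unfold Spec_escapeSysex escapeSysex
  rw [loopA data.length data 0 [] (by omega) (by simp),
      altB data.length data (by omega)]
  simp
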